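-- pv_equiv track=rewrite | github.com/gitnoober/cp | codeforces/cf_762/E.py | check
-- ===== SOURCE A (Python) =====
-- def check(cnt, mex):
--     free = 0
--     for i in range(mex):
--         if cnt[i] > 0:
--             free += cnt[i] - 1
--         else:
--             if free > 0:
--                 free -= 1
--             else:
--                 return False
--     return True
-- ===== SOURCE B (Python) =====
-- def check(cnt, mex):
--     # pass 1: prefix-balance table; prefixes[i] = sum over j<i of (cnt[j]-1 if cnt[j]>0 else -1)
--     prefixes = []
--     bal = 0
--     for i in range(mex):
--         prefixes.append(bal)
--         bal += cnt[i] - 1 if cnt[i] > 0 else -1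
--     # pass 2: fail at the first index needing a spare slot with no balance available
--     for i in range(mex):
--         if cnt[i] <= 0 and prefixes[i] <= 0:
--             return False
--     return True
-- ===== Notes on version B (the rewrite author's own statement) =====
-- stated objective: alternative
-- what changed: Replaces the single interleaved loop with early return and a mutable free counter by two separated passes: one that materialises a prefix-balance table, and one that tests each zero-count index against the table.
-- outside the precondition, e.g. on check([-1, -1], 9): A returns False, B raises IndexError
import Mathlib
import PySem

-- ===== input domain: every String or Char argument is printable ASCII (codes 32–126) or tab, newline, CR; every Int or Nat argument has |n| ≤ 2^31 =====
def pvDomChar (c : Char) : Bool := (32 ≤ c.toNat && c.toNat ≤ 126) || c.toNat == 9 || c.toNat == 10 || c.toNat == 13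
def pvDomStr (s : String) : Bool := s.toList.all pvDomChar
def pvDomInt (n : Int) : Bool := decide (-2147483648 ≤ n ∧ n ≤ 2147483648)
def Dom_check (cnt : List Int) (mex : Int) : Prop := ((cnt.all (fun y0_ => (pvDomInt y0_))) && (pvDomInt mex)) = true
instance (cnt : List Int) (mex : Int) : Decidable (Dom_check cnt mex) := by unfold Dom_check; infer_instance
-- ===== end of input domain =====

-- B is an alternative decomposition of A (two separated passes instead of one interleaved
-- loop with an early return); equivalence of return values is proved on Pre_check.

-- shared accessor for cnt[i] (Pre_check keeps every used index in range, so the default never fires)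
def cVal (cnt : List Int) (i : Int) : Int := (PySem.List.pyGet? cnt i).getD 0

-- ===== PORT A =====
def checkGoA (cnt : List Int) (free : Int) : List Int → Bool
  | [] => true
  | i :: rest =>
    if cVal cnt i > 0 then checkGoA cnt (free + (cVal cnt i - 1)) rest
    else if free > 0 then checkGoA cnt (free - 1) rest
    else false

def check (cnt : List Int) (mex : Int) : Bool :=
  checkGoA cnt 0 (PySem.List.pyRange 0 mex 1)

-- ===== PORT B =====
def bStep (cnt : List Int) (st : List Int × Int) (i : Int) : List Int × Int :=
  (st.1 ++ [st.2], st.2 + (if cVal cnt i > 0 then cVal cnt i - 1 else -1))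

def check_alt (cnt : List Int) (mex : Int) : Bool :=
  let idxs := PySem.List.pyRange 0 mex 1
  let prefixes := (idxs.foldl (bStep cnt) ([], 0)).1
  !(idxs.any (fun i =>
      decide (cVal cnt i ≤ 0) && decide ((PySem.List.pyGet? prefixes i).getD 0 ≤ 0)))

-- ===== PRECONDITION & SPEC =====
-- Pre_check excludes inputs with mex > len(cnt): there A either raises IndexError or (when an earlier
-- index already fails) returns False by early exit, while B's first pass touches every index and raises.
def Pre_check (cnt : List Int) (mex : Int) : Prop := mex ≤ (cnt.length : Int)
instance (cnt : List Int) (mex : Int) : Decidable (Pre_check cnt mex) := by unfold Pre_check; infer_instance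
def pvWitness_check : List Int × Int := ([1, 0, 2], 3)
def Spec_check (cnt : List Int) (mex : Int) (out : Bool) : Prop := out = check_alt cnt mex
instance (cnt : List Int) (mex : Int) (out : Bool) : Decidable (Spec_check cnt mex out) := by unfold Spec_check; infer_instance

-- ===== CLAIM (what is proved, stated in full; the proofs are below) =====
def Claim_equal_check : Prop := ∀ (cnt : List Int) (mex : Int), Dom_check cnt mex → Pre_check cnt mex → Spec_check cnt mex (check cnt mex)

-- ===== LEMMAS AND PROOFS =====

-- A's loop on the list of VALUES cnt[i]
def aRec (b : Int) : List Int → Bool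
  | [] => true
  | v :: rest => if v > 0 then aRec (b + (v - 1)) rest
                 else if b > 0 then aRec (b - 1) rest
                 else false

-- B's prefix table on the list of VALUES
def pfxV (b : Int) : List Int → List Int
  | [] => []
  | v :: rest => b :: pfxV (b + (if v > 0 then v - 1 else -1)) rest

theorem checkGoA_eq_aRec (cnt : List Int) (b : Int) (idxs : List Int) :
    checkGoA cnt b idxs = aRec b (idxs.map (cVal cnt)) := by
  induction idxs generalizing b with
  | nil => rfl
  | cons i rest ih => simp [checkGoA, aRec, ih]

theorem foldl_bStep (cnt : List Int) (l : List Int) (acc : List Int) (b : Int) :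
    (l.foldl (bStep cnt) (acc, b)).1 = acc ++ pfxV b (l.map (cVal cnt)) := by
  induction l generalizing acc b with
  | nil => simp [pfxV]
  | cons i rest ih => simp [bStep, pfxV, ih]

theorem any_congr_mem {α : Type} (l : List α) (p q : α → Bool)
    (h : ∀ a ∈ l, p a = q a) : l.any p = l.any q := by
  induction l with
  | nil => rfl
  | cons a rest ih =>
    simp only [List.any_cons, h a (by simp)]
    rw [ih (fun a ha => h a (by simp [ha]))]

theorem aRec_eq_table (cs : List Int) (b : Int) :
    aRec b cs =
      !((List.range cs.length).any (fun k =>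
          decide (cs.getD k 0 ≤ 0) && decide ((pfxV b cs).getD k 0 ≤ 0))) := by
  induction cs generalizing b with
  | nil => simp [aRec]
  | cons v rest ih =>
    simp only [List.length_cons, List.range_succ_eq_map, List.any_cons, List.any_map]
    have htail :
        (List.range rest.length).any
          ((fun k => decide ((v :: rest).getD k 0 ≤ 0) &&
              decide ((pfxV b (v :: rest)).getD k 0 ≤ 0)) ∘ Nat.succ)
        = (List.range rest.length).any (fun k =>
            decide (rest.getD k 0 ≤ 0) &&
            decide ((pfxV (b + (if v > 0 then v - 1 else -1)) rest).getD k 0 ≤ 0)) := by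
      apply any_congr_mem
      intro k _
      simp only [pfxV, Function.comp_apply, List.getD_cons_succ]
    rw [htail]
    by_cases hv : v > 0
    · have hv' : ¬ v ≤ 0 := by omega
      simp [aRec, pfxV, hv, hv', ih]
    · have hv' : v ≤ 0 := by omega
      by_cases hb : b > 0
      · have hb' : ¬ b ≤ 0 := by omega
        have : b + (if v > 0 then v - 1 else -1) = b - 1 := by simp [hv]; ring
        simp [aRec, pfxV, hv, hv', hb, hb', sub_eq_add_neg, ih]
      · have hb' : b ≤ 0 := by omega
        simp [aRec, pfxV, hv, hv', hb, hb']

theorem check_eq_alt (cnt : List Int) (mex : Int) : check cnt mex = check_alt cnt mex := by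
  simp only [check, check_alt]
  rw [checkGoA_eq_aRec, foldl_bStep]
  simp only [List.nil_append]
  rw [PySem.List.pyRange_one]
  simp only [Int.sub_zero, List.map_map, List.any_map]
  set n := mex.toNat with hn
  set f : Nat → Int := fun k => (0 : Int) + k with hf
  set cs : List Int := (List.range n).map (cVal cnt ∘ f) with hcs
  have hlen : cs.length = n := by simp [hcs]
  rw [aRec_eq_table, hlen]
  congr 1
  apply any_congr_mem
  intro k hk
  have hkn : k < n := by simpa using hk
  have h1 : cs.getD k 0 = cVal cnt (f k) := by
    rw [hcs, List.getD_eq_getElem?_getD]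
    simp [hkn]
  have h2 : (PySem.List.pyGet? (pfxV 0 cs) (f k)).getD 0 = (pfxV 0 cs).getD k 0 := by
    have : f k = ((k : Nat) : Int) := by simp [hf]
    rw [this, PySem.List.pyGet?_natCast, List.getD_eq_getElem?_getD]
  simp only [Function.comp_apply]
  rw [h1, h2]

-- ===== VERDICT (by name: the statement is the Claim_ definition above) =====
theorem check_spec : Claim_equal_check := by
  intro cnt mex _ _
  unfold Spec_check
  exact check_eq_alt cnt mex
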